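-- pv_equiv track=rewrite | github.com/Tired-Fox/TEDDecor | tests/Experimental_TED/parser.py | split_macros
-- ===== SOURCE A (Python) =====
-- from typing import Iterator
--
-- def split_macros(text: str) -> Iterator[str]:
--     schars = ["@", "~", "!"]
--     last, index = 0, 0
--     while index < len(text):
--         if index != 0:
--             if text[index] in schars:
--                 yield text[last:index]
--                 last = index
--
--         index += 1
--
--     if last != index:
--         yield text[last:]
-- ===== SOURCE B (Python) =====
-- def split_macros(text):
--     schars = ["@", "~", "!"]
--     buf = ""
--     for ch in text:
--         if buf and ch in schars:
--             yield buf
--             buf = ""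
--         buf += ch
--     if buf:
--         yield buf
-- ===== Notes on version B (the rewrite author's own statement) =====
-- stated objective: simpler
-- what changed: A tracks integer indices (last, index) in a while-loop and emits string slices text[last:index]; B keeps no indices at all: it iterates directly over the characters, accumulating them into a buffer and flushing the buffer whenever a macro character arrives with a non-empty buffer (which also subsumes A's explicit index-0 guard and the trailing last != index check).
import Mathlib
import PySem

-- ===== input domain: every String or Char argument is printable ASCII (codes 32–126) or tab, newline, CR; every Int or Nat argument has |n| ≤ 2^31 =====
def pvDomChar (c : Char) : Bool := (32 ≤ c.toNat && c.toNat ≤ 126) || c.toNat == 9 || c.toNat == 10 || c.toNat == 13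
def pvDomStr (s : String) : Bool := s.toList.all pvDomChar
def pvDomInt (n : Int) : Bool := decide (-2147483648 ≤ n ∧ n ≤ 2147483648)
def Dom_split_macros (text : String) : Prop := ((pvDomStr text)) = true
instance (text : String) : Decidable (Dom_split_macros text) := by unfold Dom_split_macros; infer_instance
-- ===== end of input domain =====

-- B drops A's index bookkeeping and slicing: it accumulates characters into a buffer and
-- flushes it at each macro character met with a non-empty buffer; objective: simpler.

-- ===== PORT A =====
-- A's while loop over index = 0..len-1: at a macro char (except at index 0) emit
-- text[last:index] and move last; after the loop emit text[last:] iff last != index.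
def pvBodyA (cs : List Char) (st : Int × List String) (index : Int) : Int × List String :=
  if index = 0 then st
  else if PySem.List.pyGetD cs index ' ' ∈ (['@', '~', '!'] : List Char) then
    (index, st.2 ++ [String.ofList (PySem.List.slice cs (some st.1) (some index))])
  else st

def split_macros (text : String) : List String :=
  let cs := text.toList
  let n : Int := PySem.List.len cs
  let st := (PySem.List.pyRange 0 n).foldl (pvBodyA cs) (0, [])
  if st.1 ≠ n then st.2 ++ [String.ofList (PySem.List.slice cs (some st.1) none)] else st.2

-- ===== PORT B =====
-- B's for loop body: if the buffer is non-empty and the char is a macro char, yield the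
-- buffer and reset it; then append the char to the buffer.
def pvBodyB (st : List Char × List String) (ch : Char) : List Char × List String :=
  let st := if st.1 ≠ [] ∧ ch ∈ (['@', '~', '!'] : List Char) then ([], st.2 ++ [String.ofList st.1]) else st
  (st.1 ++ [ch], st.2)

def split_macros_alt (text : String) : List String :=
  let st := text.toList.foldl pvBodyB ([], [])
  if st.1 ≠ [] then st.2 ++ [String.ofList st.1] else st.2

-- ===== PRECONDITION & SPEC =====
def Spec_split_macros (text : String) (out : List String) : Prop := out = split_macros_alt text
instance (text : String) (out : List String) : Decidable (Spec_split_macros text out) := by unfold Spec_split_macros; infer_instance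

-- ===== CLAIM (what is proved, stated in full; the proofs are below) =====
def Claim_equal_split_macros : Prop := ∀ (text : String), Dom_split_macros text → Spec_split_macros text (split_macros text)

-- ===== LEMMAS AND PROOFS =====

-- Loop correspondence: with k characters consumed, A's state is (last, acc) with last < k
-- and B's state is (cs[last:k], acc); the remaining runs agree, and B's final buffer is
-- exactly A's final tail cs[last':].
theorem pv_corr (cs : List Char) :
    ∀ (suffix : List Char) (k last : Nat) (acc : List String),
      suffix = cs.drop k → last < k → k ≤ cs.length →
      ∃ last' : Nat, last' < cs.length ∧
        (PySem.List.pyRange (k : Int) (cs.length : Int)).foldl (pvBodyA cs) ((last : Int), acc)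
          = ((last' : Int), (suffix.foldl pvBodyB ((cs.drop last).take (k - last), acc)).2)
        ∧ (suffix.foldl pvBodyB ((cs.drop last).take (k - last), acc)).1 = cs.drop last' := by
  intro suffix
  induction suffix with
  | nil =>
      intro k last acc hsuf hlast hk
      have hkl : cs.length ≤ k := by
        by_contra h
        have hne : cs.drop k ≠ [] := by
          simp [List.drop_eq_nil_iff]; omega
        exact hne hsuf.symm
      have hk' : k = cs.length := by omega
      refine ⟨last, by omega, ?_, ?_⟩
      · rw [PySem.List.pyRange_one_eq_nil (by exact_mod_cast hkl)]
        simp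
      · simp only [List.foldl_nil]
        exact List.take_of_length_le (by simp; omega)
  | cons c rest ih =>
      intro k last acc hsuf hlast hk
      have hklt : k < cs.length := by
        by_contra h
        have : cs.drop k = [] := by simp [List.drop_eq_nil_iff]; omega
        rw [this] at hsuf; simp at hsuf
      have hdrop := List.drop_eq_getElem_cons hklt
      rw [hdrop] at hsuf
      obtain ⟨hc, hrest⟩ : c = cs[k] ∧ rest = cs.drop (k + 1) := by
        exact ⟨(List.cons.injEq _ _ _ _ ▸ hsuf).1, (List.cons.injEq _ _ _ _ ▸ hsuf).2⟩
      have hrange : PySem.List.pyRange (k : Int) (cs.length : Int)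
          = (k : Int) :: PySem.List.pyRange ((k : Int) + 1) (cs.length : Int) :=
        PySem.List.pyRange_one_cons (by exact_mod_cast hklt)
      have hcast : ((k : Int) + 1) = (((k + 1 : Nat)) : Int) := by push_cast; ring
      have hbuf_len : ((cs.drop last).take (k - last)).length = k - last := by
        simp; omega
      have hbuf_ne : (cs.drop last).take (k - last) ≠ [] := by
        intro h; rw [h] at hbuf_len; simp at hbuf_len; omega
      have hget : PySem.List.pyGetD cs (k : Int) ' ' = cs[k] := by
        rw [PySem.List.pyGetD_natCast]
        exact List.getD_eq_getElem _ _ hklt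
      rw [hrange, List.foldl_cons, List.foldl_cons]
      by_cases hmem : cs[k] ∈ (['@', '~', '!'] : List Char)
      · -- boundary: A emits cs[last:k] and sets last := k; B flushes the buffer
        have hA : pvBodyA cs ((last : Int), acc) (k : Int)
            = ((k : Int), acc ++ [String.ofList ((cs.drop last).take (k - last))]) := by
          unfold pvBodyA
          rw [if_neg (by exact_mod_cast (by omega : ¬ (k : Int) = 0))]
          rw [hget, if_pos hmem, PySem.List.slice_natCast]
        have hB : pvBodyB ((cs.drop last).take (k - last), acc) c
            = ([c], acc ++ [String.ofList ((cs.drop last).take (k - last))]) := by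
          unfold pvBodyB
          rw [if_pos ⟨hbuf_ne, hc ▸ hmem⟩]
          rfl
        rw [hA, hB, hcast]
        have hbuf1 : (cs.drop k).take ((k + 1) - k) = [c] := by
          rw [show (k + 1) - k = 1 by omega, hdrop, hc]
          rfl
        obtain ⟨last', h1, h2, h3⟩ :=
          ih (k + 1) k (acc ++ [String.ofList ((cs.drop last).take (k - last))]) hrest
            (by omega) (by omega)
        rw [hbuf1] at h2 h3
        exact ⟨last', h1, h2, h3⟩
      · -- ordinary char: A's state unchanged; B appends the char to the buffer
        have hA : pvBodyA cs ((last : Int), acc) (k : Int) = ((last : Int), acc) := by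
          unfold pvBodyA
          rw [if_neg (by exact_mod_cast (by omega : ¬ (k : Int) = 0))]
          rw [hget, if_neg hmem]
        have hB : pvBodyB ((cs.drop last).take (k - last), acc) c
            = ((cs.drop last).take (k - last) ++ [c], acc) := by
          unfold pvBodyB
          rw [if_neg (by rintro ⟨-, hmem'⟩; exact hmem (hc ▸ hmem'))]
        have hbuf' : (cs.drop last).take ((k + 1) - last)
            = (cs.drop last).take (k - last) ++ [c] := by
          rw [show (k + 1) - last = (k - last) + 1 by omega, List.take_add_one]
          congr 1
          have : (cs.drop last)[k - last]? = some cs[k] := by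
            rw [List.getElem?_drop]
            rw [show last + (k - last) = k by omega]
            exact List.getElem?_eq_getElem hklt
          rw [this, hc]
          rfl
        rw [hA, hB, hcast, ← hbuf']
        exact ih (k + 1) last acc hrest (by omega) (by omega)

theorem split_macros_eq (text : String) : split_macros text = split_macros_alt text := by
  unfold split_macros split_macros_alt
  rcases hcs : text.toList with _ | ⟨c, rest⟩
  · simp [PySem.List.pyRange_one_eq_nil (le_refl (0 : Int))]
  · simp only [PySem.List.len_eq]
    rw [PySem.List.pyRange_one_cons (by exact_mod_cast Nat.succ_pos rest.length)]
    simp only [List.foldl_cons, zero_add]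
    have hA0 : pvBodyA (c :: rest) ((0 : Int), ([] : List String)) 0 = (0, []) := by
      unfold pvBodyA; simp
    have hB0 : pvBodyB (([] : List Char), ([] : List String)) c = ([c], []) := by
      unfold pvBodyB; simp
    rw [hA0, hB0]
    obtain ⟨last', h1, h2, h3⟩ := pv_corr (c :: rest) rest 1 0 [] (by simp) (by omega)
      (by simp)
    simp only [Nat.cast_zero, Nat.cast_one, Nat.sub_zero, List.drop_zero] at h2 h3
    have ht : List.take 1 (c :: rest) = [c] := rfl
    rw [ht] at h2 h3
    rw [h2]
    dsimp only
    have hne : ¬ ((last' : Int) = ((c :: rest).length : Int)) := by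
      exact_mod_cast Nat.ne_of_lt h1
    have hdrop_ne : (c :: rest).drop last' ≠ [] := by
      simp only [ne_eq, List.drop_eq_nil_iff]
      simp only [List.length_cons] at h1 ⊢
      omega
    rw [if_pos hne, h3, if_pos hdrop_ne, PySem.List.slice_from_natCast]

-- ===== VERDICT (by name: the statement is the Claim_ definition above) =====
theorem split_macros_spec : Claim_equal_split_macros := by
  intro text _
  unfold Spec_split_macros
  exact split_macros_eq text
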